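-- pv_equiv track=rewrite | github.com/sorterisntonline/compaction-demo | import2.py | extract_response_parts
-- ===== SOURCE A (Python) =====
-- def extract_response_parts(say: str) -> tuple[str, str | None]:
--     """Split response say into (text, thinking).
--
--     Responses from the exporter embed extended thinking as leading sections like:
--       "Thought: ...\n\n\nTool: ...\n\n\nActual response text..."
--     """
--     sections = say.split('\n\n\n')
--     thought_parts = []
--     response_parts = []
--     found_response = False
--
--     for section in sections:
--         stripped = section.strip()
--         if not found_response and (stripped.startswith('Thought:') or stripped.startswith('Tool:')):
--             thought_parts.append(stripped)
--         else:
--             found_response = True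
--             response_parts.append(section)
--
--     thinking = '\n\n\n'.join(thought_parts) if thought_parts else None
--     text = '\n\n\n'.join(response_parts).strip()
--     return text, thinking
-- ===== SOURCE B (Python) =====
-- def extract_response_parts(say: str) -> tuple[str, str | None]:
--     """Split response say into (text, thinking) without ever splitting into a
--     sections list: repeatedly peel a leading 'Thought:'/'Tool:' section off the
--     raw string with find('\n\n\n'); the response text is the remaining raw
--     suffix of say itself (no join), stripped."""
--     thoughts = []
--     rest = say
--     while True:
--         idx = rest.find('\n\n\n')
--         head = rest if idx < 0 else rest[:idx]
--         st = head.strip()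
--         if st.startswith('Thought:') or st.startswith('Tool:'):
--             thoughts.append(st)
--             if idx < 0:
--                 rest = ''
--                 break
--             rest = rest[idx + 3:]
--         else:
--             break
--     thinking = '\n\n\n'.join(thoughts) if thoughts else None
--     return rest.strip(), thinking
-- ===== Notes on version B (the rewrite author's own statement) =====
-- stated objective: alternative
-- what changed: B never builds a sections list: it repeatedly peels a leading Thought:/Tool: section off the raw string via find('\n\n\n') and slicing, and the response text is the remaining raw suffix of say itself (no split of the tail, no join of response parts), stripped.
import Mathlib
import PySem

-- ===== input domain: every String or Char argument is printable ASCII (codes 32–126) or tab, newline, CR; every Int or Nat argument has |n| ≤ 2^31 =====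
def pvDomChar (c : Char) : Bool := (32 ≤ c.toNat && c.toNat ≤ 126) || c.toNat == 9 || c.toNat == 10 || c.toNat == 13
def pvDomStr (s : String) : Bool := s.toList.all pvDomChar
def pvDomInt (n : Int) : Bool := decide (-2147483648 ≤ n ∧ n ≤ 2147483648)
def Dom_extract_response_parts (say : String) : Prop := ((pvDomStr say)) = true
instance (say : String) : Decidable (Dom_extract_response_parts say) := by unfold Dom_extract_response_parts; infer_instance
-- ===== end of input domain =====

-- B peels leading Thought:/Tool: sections off the raw string with find/slice and returns the raw
-- suffix stripped, instead of A's split-into-sections + flagged append loop (objective: alternative).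

-- ===== PORT A =====
-- the loop body of A: state = (thought_parts, response_parts, found_response)
def pvStepA (acc : List (List Char) × List (List Char) × Bool) (sec : List Char) :
    List (List Char) × List (List Char) × Bool :=
  let stripped := PySem.Chars.strip sec
  if !acc.2.2 && (PySem.Chars.startswith stripped "Thought:".toList
                   || PySem.Chars.startswith stripped "Tool:".toList)
  then (acc.1 ++ [stripped], acc.2.1, acc.2.2)
  else (acc.1, acc.2.1 ++ [sec], true)

def extract_response_parts (say : String) : String × Option String :=
  let sections := PySem.Chars.splitOn say.toList "\n\n\n".toList
  let st := sections.foldl pvStepA ([], [], false)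
  let thinking : Option String :=
    if st.1 ≠ [] then some (String.ofList (PySem.Chars.join "\n\n\n".toList st.1)) else none
  (String.ofList (PySem.Chars.strip (PySem.Chars.join "\n\n\n".toList st.2.1)), thinking)

-- ===== PORT B =====
-- termination fact for B's while loop: cutting at a found separator shortens the string
theorem pvCut_lt (rest : List Char) (h : 0 ≤ PySem.Chars.find rest "\n\n\n".toList) :
    (rest.drop ((PySem.Chars.find rest "\n\n\n".toList).toNat + 3)).length < rest.length := by
  have hs := (PySem.Chars.find_spec (s := rest) (sub := "\n\n\n".toList) h).1
  have hlen := hs.length_le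
  have hle := PySem.Chars.find_le_length rest "\n\n\n".toList
  simp at hs hlen ⊢
  omega

-- B's while loop: peel stripped Thought:/Tool: heads into acc; stop with the raw suffix
def pvPeel (rest : List Char) (acc : List (List Char)) : List (List Char) × List Char :=
  let idx := PySem.Chars.find rest "\n\n\n".toList
  let head := if idx < 0 then rest else rest.take idx.toNat
  let st := PySem.Chars.strip head
  if PySem.Chars.startswith st "Thought:".toList || PySem.Chars.startswith st "Tool:".toList then
    if h : idx < 0 then (acc ++ [st], [])
    else pvPeel (rest.drop (idx.toNat + 3)) (acc ++ [st])
  else (acc, rest)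
termination_by rest.length
decreasing_by exact pvCut_lt rest (by omega)

def extract_response_parts_alt (say : String) : String × Option String :=
  let r := pvPeel say.toList []
  let thinking : Option String :=
    if r.1 ≠ [] then some (String.ofList (PySem.Chars.join "\n\n\n".toList r.1)) else none
  (String.ofList (PySem.Chars.strip r.2), thinking)

-- ===== PRECONDITION & SPEC =====
def Spec_extract_response_parts (say : String) (out : String × Option String) : Prop := out = extract_response_parts_alt say
instance (say : String) (out : String × Option String) : Decidable (Spec_extract_response_parts say out) := by unfold Spec_extract_response_parts; infer_instance

-- ===== CLAIM (what is proved, stated in full; the proofs are below) =====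
def Claim_equal_extract_response_parts : Prop := ∀ (say : String), Dom_extract_response_parts say → Spec_extract_response_parts say (extract_response_parts say)

-- ===== LEMMAS AND PROOFS =====

-- reference splitter: structural form of Python's split(sep) for sep ≠ ''
def pvSpl (sep : List Char) : List Char → List (List Char)
  | [] => [[]]
  | c :: rest =>
    if sep.isPrefixOf (c :: rest) then [] :: pvSpl sep (rest.drop (sep.length - 1))
    else (pvSpl sep rest).modifyHead (c :: ·)
termination_by l => l.length
decreasing_by · simp
              · simp

theorem pvSpl_ne_nil (sep l) : pvSpl sep l ≠ [] := by
  match l with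
  | [] => simp [pvSpl]
  | c :: rest =>
    rw [pvSpl]
    split
    · simp
    · cases h : pvSpl sep rest with
      | nil => exact absurd h (pvSpl_ne_nil sep rest)
      | cons a t => simp

-- predicate of A's branch / B's loop: the stripped section is a Thought:/Tool: section
def pvIsThought (s : List Char) : Bool :=
  PySem.Chars.startswith (PySem.Chars.strip s) "Thought:".toList
    || PySem.Chars.startswith (PySem.Chars.strip s) "Tool:".toList

-- boundary of the thought prefix among sections
def pvBoundary (sections : List (List Char)) : Nat :=
  match sections with
  | [] => 0
  | s :: rest => if pvIsThought s then pvBoundary rest + 1 else 0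

-- once found_response is true, A's loop only appends to response_parts
theorem pvFoldA_true (l : List (List Char)) (tp rp : List (List Char)) :
    l.foldl pvStepA (tp, rp, true) = (tp, rp ++ l, true) := by
  induction l generalizing rp with
  | nil => simp
  | cons s rest ih =>
    simp [List.foldl, pvStepA, ih]

-- A's loop from a fresh flag computes the take/drop decomposition at pvBoundary
theorem pvFoldA_false (l : List (List Char)) (tp : List (List Char)) :
    l.foldl pvStepA (tp, [], false) =
      (tp ++ (l.take (pvBoundary l)).map PySem.Chars.strip, l.drop (pvBoundary l),
       if pvBoundary l = l.length then false else true) := by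
  induction l generalizing tp with
  | nil => simp [pvBoundary]
  | cons s rest ih =>
    by_cases h : pvIsThought s
    · have hb : pvBoundary (s :: rest) = pvBoundary rest + 1 := by simp [pvBoundary, h]
      have hstep : pvStepA (tp, [], false) s = (tp ++ [PySem.Chars.strip s], [], false) := by
        simp only [pvStepA]
        rw [if_pos]
        simpa [pvIsThought] using h
      simp only [List.foldl, hstep, ih, hb, List.take_succ_cons, List.drop_succ_cons,
        List.map_cons, List.length_cons]
      simp [List.append_assoc]
    · have hb : pvBoundary (s :: rest) = 0 := by simp [pvBoundary, h]
      have hstep : pvStepA (tp, [], false) s = (tp, [s], true) := by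
        have h' := h
        simp only [pvIsThought, Bool.or_eq_true, not_or, Bool.not_eq_true] at h'
        simp [pvStepA]
        exact ⟨by simpa using h'.1, by simpa using h'.2⟩
      simp [List.foldl, hstep, pvFoldA_true, hb]

-- the fuel-based splitOn.go computes pvSpl
theorem pvGo_eq (sep : List Char) (hsep : sep ≠ []) :
    ∀ fuel l cur acc, l.length < fuel →
      PySem.Chars.splitOn.go sep fuel l cur acc
        = acc.reverse ++ (pvSpl sep l).modifyHead (cur.reverse ++ ·) := by
  intro fuel
  induction fuel with
  | zero => intro l cur acc h; omega
  | succ fuel ih =>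
    intro l cur acc h
    obtain ⟨k, hk⟩ : ∃ k, sep.length = k + 1 :=
      Nat.exists_eq_succ_of_ne_zero (by simpa [List.length_eq_zero_iff] using hsep)
    match l with
    | [] => simp [PySem.Chars.splitOn.go, pvSpl]
    | c :: rest =>
      by_cases hp : sep.isPrefixOf (c :: rest)
      · rw [show PySem.Chars.splitOn.go sep (fuel + 1) (c :: rest) cur acc
              = PySem.Chars.splitOn.go sep fuel ((c :: rest).drop sep.length) []
                  (cur.reverse :: acc) by simp [PySem.Chars.splitOn.go, hp],
            ih _ _ _ (by simp at h ⊢; omega)]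
        rw [pvSpl, if_pos hp]
        have hd : (c :: rest).drop sep.length = rest.drop (sep.length - 1) := by simp [hk]
        rw [hd]
        cases hS : pvSpl sep (rest.drop (sep.length - 1)) with
        | nil => exact absurd hS (pvSpl_ne_nil sep _)
        | cons a t => simp
      · rw [show PySem.Chars.splitOn.go sep (fuel + 1) (c :: rest) cur acc
              = PySem.Chars.splitOn.go sep fuel rest (c :: cur) acc by
                simp [PySem.Chars.splitOn.go, hp],
            ih _ _ _ (by simp at h ⊢; omega)]
        rw [pvSpl, if_neg hp]
        cases hS : pvSpl sep rest with
        | nil => exact absurd hS (pvSpl_ne_nil sep _)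
        | cons a t => simp

theorem pvSplitOn_eq (sep : List Char) (hsep : sep ≠ []) (l : List Char) :
    PySem.Chars.splitOn l sep = pvSpl sep l := by
  rw [PySem.Chars.splitOn, pvGo_eq sep hsep (l.length + 1) l [] [] (by omega)]
  cases hS : pvSpl sep l with
  | nil => exact absurd hS (pvSpl_ne_nil sep l)
  | cons a t => simp

-- find.go with a shifted counter
theorem pvFindGo_eq (sub : List Char) : ∀ (l : List Char) (k : Nat),
    PySem.Chars.find.go sub l k
      = if PySem.Chars.find l sub = -1 then -1 else k + PySem.Chars.find l sub := by
  intro l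
  induction l with
  | nil =>
    intro k
    by_cases he : sub.isEmpty
    · simp [PySem.Chars.find.go, PySem.Chars.find, he]
    · simp [PySem.Chars.find.go, PySem.Chars.find, he]
  | cons c rest ih =>
    intro k
    by_cases hp : sub.isPrefixOf (c :: rest)
    · simp [PySem.Chars.find.go, PySem.Chars.find, hp]
    · have hge := PySem.Chars.neg_one_le_find rest sub
      rw [show PySem.Chars.find.go sub (c :: rest) k = PySem.Chars.find.go sub rest (k + 1) by
            simp [PySem.Chars.find.go, hp],
          show PySem.Chars.find (c :: rest) sub = PySem.Chars.find.go sub rest 1 by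
            simp [PySem.Chars.find, PySem.Chars.find.go, hp],
          ih (k + 1), ih 1]
      by_cases hr : PySem.Chars.find rest sub = -1
      · simp [hr]
      · have : ¬ ((1 : Int) + PySem.Chars.find rest sub = -1) := by omega
        simp only [hr, if_false]
        omega

-- unfolding find one character at a time
theorem pvFind_cons (sub : List Char) (c : Char) (rest : List Char) :
    PySem.Chars.find (c :: rest) sub
      = if sub.isPrefixOf (c :: rest) then 0
        else if PySem.Chars.find rest sub = -1 then -1 else 1 + PySem.Chars.find rest sub := by
  by_cases hp : sub.isPrefixOf (c :: rest)
  · simp [PySem.Chars.find, PySem.Chars.find.go, hp]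
  · rw [show PySem.Chars.find (c :: rest) sub = PySem.Chars.find.go sub rest 1 by
          simp [PySem.Chars.find, PySem.Chars.find.go, hp],
        pvFindGo_eq]
    simp [hp]

theorem pvFind_nil (sub : List Char) (hsub : sub ≠ []) : PySem.Chars.find [] sub = -1 := by
  simp [PySem.Chars.find, PySem.Chars.find.go, List.isEmpty_iff, hsub]

theorem pvSpl_of_find_neg (sep : List Char) (hsep : sep ≠ []) (l : List Char)
    (h : PySem.Chars.find l sep = -1) : pvSpl sep l = [l] := by
  induction l with
  | nil => simp [pvSpl]
  | cons c rest ih =>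
    rw [pvFind_cons] at h
    by_cases hp : sep.isPrefixOf (c :: rest)
    · simp [hp] at h
    · have hge := PySem.Chars.neg_one_le_find rest sep
      have hr : PySem.Chars.find rest sep = -1 := by
        by_contra hr
        simp [hp, hr] at h
        omega
      rw [pvSpl, if_neg (by simpa using hp), ih hr]
      simp

theorem pvSpl_of_find_nonneg (sep : List Char) (hsep : sep ≠ []) (l : List Char)
    (h : 0 ≤ PySem.Chars.find l sep) :
    pvSpl sep l = l.take (PySem.Chars.find l sep).toNat
      :: pvSpl sep (l.drop ((PySem.Chars.find l sep).toNat + sep.length)) := by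
  induction l with
  | nil => rw [pvFind_nil sep hsep] at h; omega
  | cons c rest ih =>
    obtain ⟨k, hk⟩ : ∃ k, sep.length = k + 1 :=
      Nat.exists_eq_succ_of_ne_zero (by simpa [List.length_eq_zero_iff] using hsep)
    by_cases hp : sep.isPrefixOf (c :: rest)
    · have hf : PySem.Chars.find (c :: rest) sep = 0 := by rw [pvFind_cons]; simp [hp]
      rw [pvSpl, if_pos (by simpa using hp), hf]
      simp [hk]
    · have hge := PySem.Chars.neg_one_le_find rest sep
      have hf := pvFind_cons sep c rest
      rw [if_neg hp] at hf
      have hr : PySem.Chars.find rest sep ≠ -1 := by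
        intro hr
        rw [pvFind_cons, if_neg hp, if_pos hr] at h
        omega
      rw [if_neg hr] at hf
      have hr0 : 0 ≤ PySem.Chars.find rest sep := by omega
      have htn : (PySem.Chars.find (c :: rest) sep).toNat
          = (PySem.Chars.find rest sep).toNat + 1 := by omega
      rw [pvSpl, if_neg (by simpa using hp), ih hr0, htn]
      simp [List.take_succ_cons, Nat.add_right_comm]

-- prepending a char to the head of a nonempty join
theorem pvJoin_modifyHead (sep : List Char) (c : Char) (S : List (List Char)) (hS : S ≠ []) :
    PySem.Chars.join sep (S.modifyHead (c :: ·)) = c :: PySem.Chars.join sep S := by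
  match S with
  | [a] => simp [PySem.Chars.join_singleton]
  | a :: b :: t => simp [PySem.Chars.join_cons_cons]

theorem pvJoin_spl (sep : List Char) (hsep : sep ≠ []) (l : List Char) :
    PySem.Chars.join sep (pvSpl sep l) = l := by
  induction l using pvSpl.induct sep with
  | case1 => simp [pvSpl, PySem.Chars.join_singleton]
  | case2 c rest hp ih =>
    rw [pvSpl, if_pos hp]
    obtain ⟨a, t, ht⟩ : ∃ a t, pvSpl sep (rest.drop (sep.length - 1)) = a :: t := by
      cases h : pvSpl sep (rest.drop (sep.length - 1)) with
      | nil => exact absurd h (pvSpl_ne_nil sep _)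
      | cons a t => exact ⟨a, t, rfl⟩
    rw [ht, PySem.Chars.join_cons_cons, ← ht, ih]
    obtain ⟨t2, ht2⟩ : ∃ t2, sep ++ t2 = c :: rest := by simpa using hp
    obtain ⟨k, hk⟩ : ∃ k, sep.length = k + 1 :=
      Nat.exists_eq_succ_of_ne_zero (by simpa [List.length_eq_zero_iff] using hsep)
    calc [] ++ sep ++ rest.drop (sep.length - 1)
        = sep ++ (c :: rest).drop sep.length := by simp [hk]
      _ = sep ++ (sep ++ t2).drop sep.length := by rw [ht2]
      _ = sep ++ t2 := by rw [List.drop_left]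
      _ = c :: rest := ht2
  | case3 c rest hp ih =>
    rw [pvSpl, if_neg hp, pvJoin_modifyHead sep c _ (pvSpl_ne_nil sep rest), ih]

-- B's peel loop computes the take/drop decomposition at pvBoundary, with the raw joined suffix
theorem pvPeel_eq (l : List Char) (acc : List (List Char)) :
    pvPeel l acc
      = (acc ++ ((pvSpl "\n\n\n".toList l).take (pvBoundary (pvSpl "\n\n\n".toList l))).map PySem.Chars.strip,
         PySem.Chars.join "\n\n\n".toList
           ((pvSpl "\n\n\n".toList l).drop (pvBoundary (pvSpl "\n\n\n".toList l)))) := by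
  fun_induction pvPeel l acc with
  | case1 rest acc idx head st hT h =>
    have hf : PySem.Chars.find rest "\n\n\n".toList = -1 := by
      have := PySem.Chars.neg_one_le_find rest "\n\n\n".toList
      simp only [idx] at h
      omega
    have hS : pvSpl "\n\n\n".toList rest = [rest] :=
      pvSpl_of_find_neg _ (by decide) _ hf
    have hst : st = PySem.Chars.strip rest := by simp only [st, head, dif_pos h]
    have hth : pvIsThought rest = true := by
      simpa [pvIsThought, hst] using hT
    rw [hS]
    simp [pvBoundary, hth, hst, PySem.Chars.join_nil]
  | case2 rest acc idx head st hT h ih =>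
    have hf : 0 ≤ PySem.Chars.find rest "\n\n\n".toList := by
      simp only [idx] at h
      omega
    have hS := pvSpl_of_find_nonneg "\n\n\n".toList (by decide) rest hf
    rw [show ("\n\n\n".toList).length = 3 from rfl] at hS
    have hhead : head = rest.take idx.toNat := by simp only [head, dif_neg h]
    have hst : st = PySem.Chars.strip (rest.take idx.toNat) := by
      simp only [st, hhead]
    have hth : pvIsThought (rest.take idx.toNat) = true := by
      simpa [pvIsThought, hst] using hT
    have hth' : pvIsThought (List.take (PySem.Chars.find rest ['\n','\n','\n']).toNat rest) = true := hth
    rw [ih, hS]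
    simp [pvBoundary, hth', hst, List.take_succ_cons, List.drop_succ_cons]
    exact ⟨⟨rfl, rfl⟩, rfl⟩
  | case3 rest acc idx head st hT =>
    have hb0 : pvBoundary (pvSpl "\n\n\n".toList rest) = 0 := by
      by_cases h : idx < 0
      · have hf : PySem.Chars.find rest "\n\n\n".toList = -1 := by
          have := PySem.Chars.neg_one_le_find rest "\n\n\n".toList
          simp only [idx] at h
          omega
        have hst : st = PySem.Chars.strip rest := by simp only [st, head, dif_pos h]
        have hth : pvIsThought rest = false := by
          simpa [pvIsThought, hst] using hT
        rw [pvSpl_of_find_neg _ (by decide) _ hf]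
        simp [pvBoundary, hth]
      · have hf : 0 ≤ PySem.Chars.find rest "\n\n\n".toList := by
          simp only [idx] at h
          omega
        have hst : st = PySem.Chars.strip (rest.take idx.toNat) := by
          simp only [st, head, dif_neg h]
        have hth : pvIsThought (rest.take idx.toNat) = false := by
          simpa [pvIsThought, hst] using hT
        have hth' : pvIsThought (List.take (PySem.Chars.find rest ['\n','\n','\n']).toNat rest) = false := hth
        rw [pvSpl_of_find_nonneg "\n\n\n".toList (by decide) rest hf]
        simp [pvBoundary, hth']
    rw [hb0]
    simp
    exact (pvJoin_spl "\n\n\n".toList (by decide) rest).symm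

-- ===== VERDICT (by name: the statement is the Claim_ definition above) =====
theorem extract_response_parts_spec : Claim_equal_extract_response_parts := by
  intro say _
  unfold Spec_extract_response_parts extract_response_parts extract_response_parts_alt
  rw [pvSplitOn_eq "\n\n\n".toList (by decide)]
  simp only [pvFoldA_false, List.nil_append, pvPeel_eq]
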